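-- pv_equiv track=rewrite | github.com/ericburrell-23-1/jy_graphmaster | src/algorithm/update_states/standard_CVRP.py | get_unique_value_from_list
-- ===== SOURCE A (Python) =====
-- def get_unique_value_from_list(cus_lst, m):
--     """
--     Generate all possible unique sums from the list that don't exceed m.
--     Uses dynamic programming approach for subset sum problem.
--
--     Args:
--         cus_lst: List of customer demands
--         m: Maximum capacity
--
--     Returns:
--         List of all possible unique sums
--     """
--     possible_sums = {0}  # Start with an empty subset sum
--
--     for num in cus_lst:
--         new_sums = set()
--         for current_sum in possible_sums:
--             new_sum = current_sum + num
--             if new_sum <= m: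
--                 new_sums.add(new_sum)
--         possible_sums.update(new_sums)
--
--     possible_sums.discard(0)  # Remove the initial empty sum if not needed
--     return sorted(possible_sums)  # Return sorted results
-- ===== SOURCE B (Python) =====
-- def get_unique_value_from_list(cus_lst, m):
--     """Depth-first search over the state graph whose nodes are (index, partial sum):
--     from (i, s) we may skip element i or take it (when the new sum stays <= m).
--     Every partial sum of a visited state is an achievable sum (remaining elements
--     can all be skipped), so a single global set collects them as states are
--     first visited.  Answer: the collected sums without 0, sorted."""
--     n = len(cus_lst)
--     seen = set()
--     sums = set()
--
--     def visit(i, s):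
--         if (i, s) in seen:
--             return
--         seen.add((i, s))
--         sums.add(s)
--         if i < n:
--             visit(i + 1, s)
--             t = s + cus_lst[i]
--             if t <= m:
--                 visit(i + 1, t)
--
--     visit(0, 0)
--     return sorted(x for x in sums if x != 0)
-- ===== Notes on version B (the rewrite author's own statement) =====
-- stated objective: alternative
-- what changed: Replaced A's bottom-up DP (the set of achievable sums rebuilt element by element with an inner scan over all current sums, then a final sort) by a recursive depth-first search over the state graph of (index, partial-sum) pairs with a visited-state set, collecting each visited state's sum into one global set; same asymptotic cost, trading a constant factor of per-state bookkeeping for the different decomposition.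
import Mathlib
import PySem

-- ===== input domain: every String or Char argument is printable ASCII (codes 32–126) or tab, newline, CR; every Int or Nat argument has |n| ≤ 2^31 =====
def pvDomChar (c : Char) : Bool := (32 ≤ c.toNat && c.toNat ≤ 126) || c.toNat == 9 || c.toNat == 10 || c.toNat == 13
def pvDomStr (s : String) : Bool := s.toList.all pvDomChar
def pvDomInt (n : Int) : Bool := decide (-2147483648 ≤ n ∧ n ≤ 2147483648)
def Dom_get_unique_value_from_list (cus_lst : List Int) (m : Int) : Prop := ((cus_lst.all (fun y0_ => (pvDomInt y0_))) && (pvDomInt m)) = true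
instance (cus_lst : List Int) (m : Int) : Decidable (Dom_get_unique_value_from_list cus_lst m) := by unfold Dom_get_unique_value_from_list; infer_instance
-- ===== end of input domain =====

-- B replaces A's bottom-up forward set DP by a recursive depth-first search over (index, partial-sum) states with a visited set (alternative decomposition).


-- ===== PORT A =====
def get_unique_value_from_list (cus_lst : List Int) (m : Int) : List Int :=
  let possible_sums : PySem.Set Int :=
    cus_lst.foldl (fun possible_sums num =>
      let new_sums : PySem.Set Int :=
        possible_sums.foldl (fun ns current_sum =>
          if current_sum + num ≤ m then PySem.Set.add ns (current_sum + num) else ns)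
          PySem.Set.empty
      PySem.Set.update possible_sums new_sums)
      (PySem.Set.ofList [0])
  PySem.List.sorted (PySem.Set.discard possible_sums 0) (fun x => x) false

-- ===== PORT B =====
-- Source B's inner 'visit(i, s)': recursion carries the remaining suffix 'rest' (= cus_lst[i:],
-- structural recursion; 'i < n' is 'rest nonempty') together with the index i used in the
-- visited-state set, and threads the state (seen, sums).
def pvVisit (m : Int) : List Int → Int → Int → PySem.Set (Int × Int) × PySem.Set Int →
    PySem.Set (Int × Int) × PySem.Set Int
  | rest, i, s, st =>
    if PySem.Set.contains st.1 (i, s) then st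
    else
      let seen := PySem.Set.add st.1 (i, s)
      let sums := PySem.Set.add st.2 s
      match rest with
      | [] => (seen, sums)
      | num :: r =>
          let st1 := pvVisit m r (i + 1) s (seen, sums)
          let t := s + num
          if t ≤ m then pvVisit m r (i + 1) t st1 else st1

def get_unique_value_from_list_alt (cus_lst : List Int) (m : Int) : List Int :=
  let st := pvVisit m cus_lst 0 0 (PySem.Set.empty, PySem.Set.empty)
  PySem.List.sorted (st.2.filter (fun x => decide (x ≠ 0))) (fun x => x) false

-- ===== PRECONDITION & SPEC =====
def Spec_get_unique_value_from_list (cus_lst : List Int) (m : Int) (out : List Int) : Prop := out = get_unique_value_from_list_alt cus_lst m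
instance (cus_lst : List Int) (m : Int) (out : List Int) : Decidable (Spec_get_unique_value_from_list cus_lst m out) := by unfold Spec_get_unique_value_from_list; infer_instance

-- ===== CLAIM (what is proved, stated in full; the proofs are below) =====
def Claim_equal_get_unique_value_from_list : Prop := ∀ (cus_lst : List Int) (m : Int), Dom_get_unique_value_from_list cus_lst m → Spec_get_unique_value_from_list cus_lst m (get_unique_value_from_list cus_lst m)

-- ===== LEMMAS AND PROOFS =====

-- the common semantics: x is a final sum obtainable from partial sum s through the list,
-- every intermediate sum staying ≤ m
def pvFF (m : Int) : List Int → Int → Int → Prop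
  | [], s, x => x = s
  | num :: r, s, x => pvFF m r s x ∨ (s + num ≤ m ∧ pvFF m r (s + num) x)

-- ---- A side ----

def stepA (m : Int) (possible_sums : PySem.Set Int) (num : Int) : PySem.Set Int :=
  PySem.Set.update possible_sums
    (possible_sums.foldl (fun ns current_sum =>
        if current_sum + num ≤ m then PySem.Set.add ns (current_sum + num) else ns)
      PySem.Set.empty)

lemma mem_inner_fold (S : List Int) (num m : Int) (init : PySem.Set Int) (x : Int) :
    x ∈ S.foldl (fun ns s => if s + num ≤ m then PySem.Set.add ns (s + num) else ns) init ↔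
      x ∈ init ∨ ∃ s ∈ S, s + num ≤ m ∧ x = s + num := by
  induction S generalizing init with
  | nil => simp
  | cons s S ih =>
      simp only [List.foldl_cons]
      rw [ih]
      by_cases h : s + num ≤ m
      · simp [h, PySem.Set.mem_add]; tauto
      · rw [if_neg h]
        constructor
        · rintro (h1 | ⟨t, ht, h2, h3⟩)
          · exact Or.inl h1
          · exact Or.inr ⟨t, List.mem_cons_of_mem _ ht, h2, h3⟩
        · rintro (h1 | ⟨t, ht, h2, h3⟩)
          · exact Or.inl h1
          · rcases List.mem_cons.mp ht with rfl | ht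
            · exact absurd h2 h
            · exact Or.inr ⟨t, ht, h2, h3⟩

lemma mem_stepA (m : Int) (S : PySem.Set Int) (num x : Int) :
    x ∈ stepA m S num ↔ x ∈ S ∨ ∃ s ∈ S, s + num ≤ m ∧ x = s + num := by
  unfold stepA
  rw [PySem.Set.mem_update, mem_inner_fold]
  simp [PySem.Set.empty]

lemma nodup_foldl_stepA (m : Int) (lst : List Int) (S : PySem.Set Int) (hS : S.Nodup) :
    (lst.foldl (stepA m) S).Nodup := by
  induction lst generalizing S with
  | nil => exact hS
  | cons num r ih => exact ih _ (PySem.Set.nodup_update _ _ hS)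

lemma mem_foldl_stepA (m : Int) (lst : List Int) (S : PySem.Set Int) (x : Int) :
    x ∈ lst.foldl (stepA m) S ↔ ∃ s ∈ S, pvFF m lst s x := by
  induction lst generalizing S with
  | nil => simp [pvFF]
  | cons num r ih =>
      simp only [List.foldl_cons]
      rw [ih]
      constructor
      · rintro ⟨s', hs', hF⟩
        rcases (mem_stepA m S num s').mp hs' with h | ⟨s, hs, hle, rfl⟩
        · exact ⟨s', h, Or.inl hF⟩
        · exact ⟨s, hs, Or.inr ⟨hle, hF⟩⟩
      · rintro ⟨s, hs, hF | ⟨hle, hF⟩⟩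
        · exact ⟨s, (mem_stepA m S num s).mpr (Or.inl hs), hF⟩
        · exact ⟨s + num, (mem_stepA m S num _).mpr (Or.inr ⟨s, hs, hle, rfl⟩), hF⟩

-- ---- B side ----

lemma pvFF_refl (m : Int) (r : List Int) (s : Int) : pvFF m r s s := by
  induction r generalizing s with
  | nil => rfl
  | cons num r ih => exact Or.inl (ih s)

-- invariant of the DFS: every visited state (j, s') with index ≥ the current call's
-- index is fully explored: all sums pvFF-derivable from it are already collected
def SeenInv (lst : List Int) (m : Int) (i : ℕ)
    (st : PySem.Set (Int × Int) × PySem.Set Int) : Prop :=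
  ∀ p ∈ st.1, (i : Int) ≤ p.1 → ∀ x, pvFF m (lst.drop p.1.toNat) p.2 x → x ∈ st.2

lemma visit_correct (lst : List Int) (m : Int) :
    ∀ (rest : List Int) (i : ℕ) (s : Int)
      (st : PySem.Set (Int × Int) × PySem.Set Int),
      rest = lst.drop i → SeenInv lst m i st → st.2.Nodup →
      (∀ x, x ∈ (pvVisit m rest (i : Int) s st).2 ↔ x ∈ st.2 ∨ pvFF m rest s x) ∧
      (pvVisit m rest (i : Int) s st).2.Nodup ∧
      SeenInv lst m i (pvVisit m rest (i : Int) s st) ∧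
      (∀ p ∈ (pvVisit m rest (i : Int) s st).1, p ∈ st.1 ∨ (i : Int) ≤ p.1) := by
  intro rest
  induction rest with
  | nil =>
      intro i s st hdrop hinv hnd
      rw [pvVisit]
      by_cases hc : PySem.Set.contains st.1 ((i : Int), s) = true
      · rw [if_pos hc]
        have hmem := (PySem.Set.contains_iff _ _).mp hc
        refine ⟨?_, hnd, hinv, fun p hp => Or.inl hp⟩
        intro x
        have := hinv _ hmem (le_refl _) x
        rw [Int.toNat_natCast, ← hdrop] at this
        constructor
        · exact Or.inl
        · rintro (h | h)
          · exact h
          · exact this h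
      · rw [if_neg hc]
        refine ⟨?_, PySem.Set.nodup_add _ _ hnd, ?_, ?_⟩
        · intro x
          rw [PySem.Set.mem_add]
          simp [pvFF, eq_comm]
        · intro p hp hle x hF
          rw [PySem.Set.mem_add] at hp
          rw [PySem.Set.mem_add]
          rcases hp with hp | rfl
          · exact Or.inl (hinv _ hp hle x hF)
          · simp only [Int.toNat_natCast, ← hdrop, pvFF] at hF
            exact Or.inr hF
        · intro p hp
          rw [PySem.Set.mem_add] at hp
          rcases hp with hp | rfl
          · exact Or.inl hp
          · exact Or.inr (le_refl _)
  | cons num r ih =>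
      intro i s st hdrop hinv hnd
      have hr : r = lst.drop (i + 1) := by
        have := congrArg List.tail hdrop
        simpa [List.tail_drop] using this
      have hcast : ((i : Int) + 1) = ((i + 1 : ℕ) : Int) := by push_cast; ring
      rw [pvVisit]
      by_cases hc : PySem.Set.contains st.1 ((i : Int), s) = true
      · rw [if_pos hc]
        have hmem := (PySem.Set.contains_iff _ _).mp hc
        refine ⟨?_, hnd, hinv, fun p hp => Or.inl hp⟩
        intro x
        have := hinv _ hmem (le_refl _) x
        rw [Int.toNat_natCast, ← hdrop] at this
        constructor
        · exact Or.inl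
        · rintro (h | h)
          · exact h
          · exact this h
      · rw [if_neg hc]
        -- state after marking (i, s) visited and collecting s
        have hinv1 : SeenInv lst m (i + 1)
            (PySem.Set.add st.1 ((i : Int), s), PySem.Set.add st.2 s) := by
          intro p hp hle x hF
          rw [PySem.Set.mem_add] at hp
          rw [PySem.Set.mem_add]
          rcases hp with hp | rfl
          · exact Or.inl (hinv _ hp (by push_cast at hle ⊢; omega) x hF)
          · exfalso
            simp only at hle
            omega
        have h1 := ih (i + 1) s _ hr hinv1 (PySem.Set.nodup_add _ _ hnd)
        rw [← hcast] at h1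
        set st1 := pvVisit m r ((i : Int) + 1) s
          (PySem.Set.add st.1 ((i : Int), s), PySem.Set.add st.2 s) with hst1
        by_cases hle : s + num ≤ m
        · simp only [if_pos hle]
          have h2 := ih (i + 1) (s + num) st1 hr h1.2.2.1 h1.2.1
          rw [← hcast] at h2
          set st2 := pvVisit m r ((i : Int) + 1) (s + num) st1 with hst2
          have hmono1 : ∀ x ∈ PySem.Set.add st.2 s, x ∈ st1.2 :=
            fun x hx => (h1.1 x).mpr (Or.inl hx)
          have hmono2 : ∀ x ∈ st1.2, x ∈ st2.2 :=
            fun x hx => (h2.1 x).mpr (Or.inl hx)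
          have hmemA : ∀ x, x ∈ st2.2 ↔ x ∈ st.2 ∨ pvFF m (num :: r) s x := by
            intro x
            rw [h2.1 x, h1.1 x, PySem.Set.mem_add]
            constructor
            · rintro (((hx | rfl) | hF) | hF)
              · exact Or.inl hx
              · exact Or.inr (pvFF_refl m _ x)
              · exact Or.inr (Or.inl hF)
              · exact Or.inr (Or.inr ⟨hle, hF⟩)
            · rintro (hx | hF | ⟨_, hF⟩)
              · exact Or.inl (Or.inl (Or.inl hx))
              · exact Or.inl (Or.inr hF)
              · exact Or.inr hF
          refine ⟨hmemA, h2.2.1, ?_, ?_⟩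
          · intro p hp hige x hF
            by_cases hgt : ((i : Int) + 1) ≤ p.1
            · exact h2.2.2.1 p hp (by rw [hcast] at hgt; exact_mod_cast hgt) x hF
            · -- p.1 = i
              rcases h2.2.2.2 p hp with hp1 | hp1
              · rcases h1.2.2.2 p hp1 with hp0 | hp0
                · rw [PySem.Set.mem_add] at hp0
                  rcases hp0 with hp0 | rfl
                  · refine hmono2 _ (hmono1 _ ?_)
                    rw [PySem.Set.mem_add]
                    exact Or.inl (hinv _ hp0 hige x hF)
                  · simp only [Int.toNat_natCast, ← hdrop] at hF
                    rcases hF with hF | ⟨_, hF⟩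
                    · exact hmono2 _ ((h1.1 x).mpr (Or.inr hF))
                    · exact (h2.1 x).mpr (Or.inr hF)
                · exact absurd (by rw [hcast] at hp0; exact_mod_cast hp0) hgt
              · exact absurd (by rw [hcast] at hp1; exact_mod_cast hp1) hgt
          · intro p hp
            rcases h2.2.2.2 p hp with hp1 | hp1
            · rcases h1.2.2.2 p hp1 with hp0 | hp0
              · rw [PySem.Set.mem_add] at hp0
                rcases hp0 with hp0 | rfl
                · exact Or.inl hp0
                · exact Or.inr (le_refl _)
              · exact Or.inr (by omega)
            · exact Or.inr (by omega)
        · simp only [if_neg hle]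
          have hmono1 : ∀ x ∈ PySem.Set.add st.2 s, x ∈ st1.2 :=
            fun x hx => (h1.1 x).mpr (Or.inl hx)
          have hmemA : ∀ x, x ∈ st1.2 ↔ x ∈ st.2 ∨ pvFF m (num :: r) s x := by
            intro x
            rw [h1.1 x, PySem.Set.mem_add]
            constructor
            · rintro ((hx | rfl) | hF)
              · exact Or.inl hx
              · exact Or.inr (pvFF_refl m _ x)
              · exact Or.inr (Or.inl hF)
            · rintro (hx | hF | ⟨hFle, _⟩)
              · exact Or.inl (Or.inl hx)
              · exact Or.inr hF
              · exact absurd hFle hle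
          refine ⟨hmemA, h1.2.1, ?_, ?_⟩
          · intro p hp hige x hF
            by_cases hgt : ((i : Int) + 1) ≤ p.1
            · exact h1.2.2.1 p hp (by rw [hcast] at hgt; exact_mod_cast hgt) x hF
            · rcases h1.2.2.2 p hp with hp0 | hp0
              · rw [PySem.Set.mem_add] at hp0
                rcases hp0 with hp0 | rfl
                · refine hmono1 _ ?_
                  rw [PySem.Set.mem_add]
                  exact Or.inl (hinv _ hp0 hige x hF)
                · simp only [Int.toNat_natCast, ← hdrop] at hF
                  rcases hF with hF | ⟨hFle, _⟩
                  · exact (h1.1 x).mpr (Or.inr hF)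
                  · exact absurd hFle hle
              · exact absurd (by rw [hcast] at hp0; exact_mod_cast hp0) hgt
          · intro p hp
            rcases h1.2.2.2 p hp with hp0 | hp0
            · rw [PySem.Set.mem_add] at hp0
              rcases hp0 with hp0 | rfl
              · exact Or.inl hp0
              · exact Or.inr (le_refl _)
            · exact Or.inr (by omega)

-- ===== VERDICT (by name: the statement is the Claim_ definition above) =====
theorem get_unique_value_from_list_spec : Claim_equal_get_unique_value_from_list := by
  intro cus_lst m _
  unfold Spec_get_unique_value_from_list get_unique_value_from_list get_unique_value_from_list_alt
  have hB := visit_correct cus_lst m cus_lst 0 0 (PySem.Set.empty, PySem.Set.empty)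
    (by simp) (by intro p hp; simp [PySem.Set.empty] at hp) List.nodup_nil
  simp only [Nat.cast_zero] at hB
  have hA_mem : ∀ x, x ∈ cus_lst.foldl (stepA m) (PySem.Set.ofList [0]) ↔ pvFF m cus_lst 0 x := by
    intro x
    rw [mem_foldl_stepA]
    simp [PySem.Set.mem_ofList]
  have hA_nodup : (cus_lst.foldl (stepA m) (PySem.Set.ofList [0])).Nodup :=
    nodup_foldl_stepA m cus_lst _ (PySem.Set.nodup_ofList _)
  apply PySem.List.sorted_eq_sorted_of_perm _ _ _ (fun a b h => h)
  apply (List.perm_ext_iff_of_nodup (PySem.Set.nodup_discard _ _ hA_nodup)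
    (List.Nodup.filter _ hB.2.1)).mpr
  intro x
  rw [PySem.Set.mem_discard, List.mem_filter]
  have hx := hB.1 x
  simp only [PySem.Set.empty, List.not_mem_nil, false_or] at hx
  simp [hA_mem x, hx]
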